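-- pv_equiv track=rewrite | github.com/islijepcevic/the_best_ppj_lab_ever | lab3_semanticka_analiza/analizator/semanticki_analizator.py | izbroji_znakove
-- ===== SOURCE A (Python) =====
-- def izbroji_znakove( niz_znakova ):
--
--     prefiksirano = False
--     broj = 0
--
--     for znak in niz_znakova[1:-1]:
--
--         if prefiksirano:
--             prefiksirano = False
--
--             broj += 1
--
--         else:
--             if znak == '\\':
--                 prefiksirano = True
--             else:
--                 broj += 1
--
--     return broj
-- ===== SOURCE B (Python) =====
-- def izbroji_znakove(niz_znakova):
--     content = niz_znakova[1:-1]
--     return len(content) - content.count('\\') + content.count('\\\\')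
-- ===== Notes on version B (the rewrite author's own statement) =====
-- stated objective: faster
-- what changed: Replaces the character-by-character escape-flag state machine with a closed-form arithmetic on substring counts (body length minus the number of backslash characters plus the number of non-overlapping double-backslash pairs), since each maximal run of k backslashes hides exactly k minus floor(k/2) characters; the counts run in C via str.count.
import Mathlib
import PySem

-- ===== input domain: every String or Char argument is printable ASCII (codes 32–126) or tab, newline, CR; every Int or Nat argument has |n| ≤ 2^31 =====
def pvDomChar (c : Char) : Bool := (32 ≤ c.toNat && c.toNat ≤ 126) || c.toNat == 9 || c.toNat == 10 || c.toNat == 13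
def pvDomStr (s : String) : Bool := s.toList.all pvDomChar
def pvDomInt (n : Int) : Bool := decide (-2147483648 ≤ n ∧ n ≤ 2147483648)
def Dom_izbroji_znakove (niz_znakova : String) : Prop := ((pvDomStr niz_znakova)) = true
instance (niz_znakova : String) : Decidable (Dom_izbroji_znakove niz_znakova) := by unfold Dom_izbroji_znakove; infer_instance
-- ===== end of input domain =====

-- B replaces A's escape-flag state machine with a closed form over substring counts:
-- body length minus its backslash count plus its non-overlapping double-backslash pair count; same O(n), measured faster (str.count runs in C).

-- ===== PORT A =====
-- loop body of A: state = (prefiksirano, broj)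
def izbrojiStepA (st : Bool × Int) (znak : Char) : Bool × Int :=
  if st.1 then (false, st.2 + 1)
  else if znak = '\\' then (true, st.2)
  else (st.1, st.2 + 1)

def izbroji_znakove (niz_znakova : String) : Int :=
  ((PySem.List.slice niz_znakova.toList (some 1) (some (-1))).foldl izbrojiStepA (false, 0)).2

-- ===== PORT B =====
def izbroji_znakove_alt (niz_znakova : String) : Int :=
  let content := PySem.Str.slice niz_znakova (some 1) (some (-1))
  (PySem.Str.len content : Int) - (PySem.Str.count content "\\" : Int)
    + (PySem.Str.count content "\\\\" : Int)

-- ===== PRECONDITION & SPEC =====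
def Spec_izbroji_znakove (niz_znakova : String) (out : Int) : Prop := out = izbroji_znakove_alt niz_znakova
instance (niz_znakova : String) (out : Int) : Decidable (Spec_izbroji_znakove niz_znakova out) := by unfold Spec_izbroji_znakove; infer_instance

-- ===== CLAIM (what is proved, stated in full; the proofs are below) =====
def Claim_equal_izbroji_znakove : Prop := ∀ (niz_znakova : String), Dom_izbroji_znakove niz_znakova → Spec_izbroji_znakove niz_znakova (izbroji_znakove niz_znakova)

-- ===== LEMMAS AND PROOFS =====
-- reference recursions for the two substring counts used by B
def cntBS : List Char → Nat
  | [] => 0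
  | c :: r => (if c = '\\' then 1 else 0) + cntBS r

def cntBS2 : List Char → Nat
  | [] => 0
  | [_] => 0
  | c :: d :: r => if c = '\\' ∧ d = '\\' then 1 + cntBS2 r else cntBS2 (d :: r)

theorem cntBS2_cons_of_ne {c : Char} (r : List Char) (hc : c ≠ '\\') :
    cntBS2 (c :: r) = cntBS2 r := by
  cases r with
  | nil => simp [cntBS2]
  | cons d r' => simp [cntBS2, hc]

-- PySem.Chars.count.go for the fixed pattern ['\'] computes cntBS
theorem go_one : ∀ (fuel : Nat) (l : List Char) (acc : Nat), l.length ≤ fuel →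
    PySem.Chars.count.go ['\\'] fuel l acc = acc + cntBS l := by
  intro fuel
  induction fuel with
  | zero => intro l acc h; rw [List.length_eq_zero_iff.mp (Nat.le_zero.mp h)]; simp [PySem.Chars.count.go, cntBS]
  | succ n ih =>
    intro l acc h
    cases l with
    | nil => simp [PySem.Chars.count.go, cntBS]
    | cons c r =>
      by_cases hc : c = '\\'
      · subst hc
        rw [show PySem.Chars.count.go ['\\'] (n+1) ('\\' :: r) acc
              = PySem.Chars.count.go ['\\'] n r (acc + 1) by
            simp [PySem.Chars.count.go, List.isPrefixOf]]
        rw [ih r (acc + 1) (by simpa using Nat.lt_succ_iff.mp (by simpa using h))]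
        simp [cntBS]; omega
      · rw [show PySem.Chars.count.go ['\\'] (n+1) (c :: r) acc
              = PySem.Chars.count.go ['\\'] n r acc by
            simp [PySem.Chars.count.go, List.isPrefixOf, Ne.symm hc]]
        rw [ih r acc (by simpa using Nat.lt_succ_iff.mp (by simpa using h))]
        simp [cntBS, hc]

-- PySem.Chars.count.go for the fixed pattern ['\','\'] computes cntBS2
theorem go_two : ∀ (fuel : Nat) (l : List Char) (acc : Nat), l.length ≤ fuel →
    PySem.Chars.count.go ['\\', '\\'] fuel l acc = acc + cntBS2 l := by
  intro fuel
  induction fuel with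
  | zero => intro l acc h; rw [List.length_eq_zero_iff.mp (Nat.le_zero.mp h)]; simp [PySem.Chars.count.go, cntBS2]
  | succ n ih =>
    intro l acc h
    cases l with
    | nil => simp [PySem.Chars.count.go, cntBS2]
    | cons c r =>
      by_cases hc : c = '\\'
      · subst hc
        cases r with
        | nil =>
          rw [show PySem.Chars.count.go ['\\','\\'] (n+1) ['\\'] acc
                = PySem.Chars.count.go ['\\','\\'] n [] acc by
              simp [PySem.Chars.count.go, List.isPrefixOf]]
          cases n <;> simp [PySem.Chars.count.go, cntBS2]
        | cons d r' =>
          by_cases hd : d = '\\'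
          · subst hd
            rw [show PySem.Chars.count.go ['\\','\\'] (n+1) ('\\' :: '\\' :: r') acc
                  = PySem.Chars.count.go ['\\','\\'] n r' (acc + 1) by
                simp [PySem.Chars.count.go, List.isPrefixOf]]
            rw [ih r' (acc + 1) (by simp at h ⊢; omega)]
            simp [cntBS2]; omega
          · rw [show PySem.Chars.count.go ['\\','\\'] (n+1) ('\\' :: d :: r') acc
                  = PySem.Chars.count.go ['\\','\\'] n (d :: r') acc by
                simp [PySem.Chars.count.go, List.isPrefixOf, Ne.symm hd]]
            rw [ih (d :: r') acc (by simp at h ⊢; omega)]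
            simp [cntBS2, hd]
      · rw [show PySem.Chars.count.go ['\\','\\'] (n+1) (c :: r) acc
              = PySem.Chars.count.go ['\\','\\'] n r acc by
            simp [PySem.Chars.count.go, List.isPrefixOf, Ne.symm hc]]
        rw [ih r acc (by simpa using Nat.lt_succ_iff.mp (by simpa using h))]
        rw [cntBS2_cons_of_ne r hc]

theorem count_one_eq (l : List Char) : PySem.Chars.count l ['\\'] = cntBS l := by
  simp [PySem.Chars.count]; simpa using go_one l.length l 0 le_rfl

theorem count_two_eq (l : List Char) : PySem.Chars.count l ['\\','\\'] = cntBS2 l := by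
  simp [PySem.Chars.count]; simpa using go_two l.length l 0 le_rfl

-- B's closed form as a function of the body, on the list side
def closedF (l : List Char) : Int := (l.length : Int) - (cntBS l : Int) + (cntBS2 l : Int)

-- invariant of A's fold, for both flag states, against B's closed form
theorem izbroji_fold_spec (l : List Char) : ∀ b : Int,
    (l.foldl izbrojiStepA (false, b)).2 = b + closedF l ∧
    (l.foldl izbrojiStepA (true, b)).2 =
      b + (match l with | [] => 0 | _ :: r => 1 + closedF r) := by
  induction l with
  | nil => intro b; simp [closedF, cntBS, cntBS2]
  | cons c r ih =>
    intro b
    constructor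
    · by_cases hc : c = '\\'
      · simp only [List.foldl, izbrojiStepA, hc, Bool.false_eq_true, reduceIte]
        rw [(ih b).2]
        rcases r with _ | ⟨d, r'⟩
        · simp [closedF, cntBS, cntBS2]
        · by_cases hd : d = '\\'
          · subst hd
            have h2 : cntBS2 ('\\' :: '\\' :: r') = 1 + cntBS2 r' := by simp [cntBS2]
            rw [(show ((match ('\\' :: r' : List Char) with | [] => (0:Int) | _ :: r => 1 + closedF r)) = 1 + closedF r' from rfl)]
            simp [closedF, cntBS, cntBS2]; ring
          · rw [(show ((match (d :: r' : List Char) with | [] => (0:Int) | _ :: r => 1 + closedF r)) = 1 + closedF r' from rfl)]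
            have h2 : cntBS2 ('\\' :: d :: r') = cntBS2 (d :: r') := by simp [cntBS2, hd]
            rw [show closedF ('\\' :: d :: r')
                  = ((d :: r').length + 1 : Int) - ((cntBS (d :: r') : Int) + 1) + (cntBS2 (d :: r') : Int) by
                simp [closedF, cntBS, h2]; ring]
            rw [cntBS2_cons_of_ne r' hd]
            simp [closedF, cntBS, hd]; ring
      · simp only [List.foldl, izbrojiStepA, Bool.false_eq_true, reduceIte, if_neg hc]
        rw [(ih (b + 1)).1]
        rw [show closedF (c :: r) = 1 + closedF r by
          simp [closedF, cntBS, hc, cntBS2_cons_of_ne r hc]; ring]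
        ring
    · simp only [List.foldl, izbrojiStepA, reduceIte]
      rcases r with _ | ⟨d, r'⟩
      · simp [closedF, cntBS, cntBS2]
      · rw [(ih (b + 1)).1]; ring

-- ===== VERDICT (by name: the statement is the Claim_ definition above) =====
theorem izbroji_znakove_spec : Claim_equal_izbroji_znakove := by
  intro s _
  unfold Spec_izbroji_znakove izbroji_znakove izbroji_znakove_alt
  rw [(izbroji_fold_spec _ 0).1]
  have hbs : ("\\" : String).toList = ['\\'] := rfl
  have hbs2 : ("\\\\" : String).toList = ['\\', '\\'] := rfl
  simp only [PySem.Str.count_eq, PySem.Str.len_eq, PySem.Str.toList_slice,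
    PySem.Chars.slice_eq_listSlice, hbs, hbs2,
    count_one_eq, count_two_eq, closedF]
  ring
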